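-- pv_equiv track=rewrite | github.com/sagebhardt/pricing-optimization-ynk | src/models/pricing_simulation.py | snap_to_price_anchor
-- ===== SOURCE A (Python) =====
-- PRICE_ANCHORS = [
--     990, 1990, 2990, 3990, 4990, 5990, 6990, 7990, 8990, 9990,
--     12990, 14990, 16990, 19990,
--     24990, 29990, 34990, 39990, 44990, 49990,
--     54990, 59990, 69990, 79990, 89990, 99990,
--     109990, 119990, 129990, 139990, 149990, 169990, 199990,
--     249990, 299990, 399990, 499990, 599990, 799990, 999990,
-- ]
--
-- def snap_to_price_anchor(price, direction="down"):
--     """Snap price to the nearest cognitive price anchor."""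
--     if price <= 0:
--         return 0
--     if price > PRICE_ANCHORS[-1]:
--         step = 10000
--         if direction == "down":
--             return int(price // step) * step - 10
--         elif direction == "up":
--             return (int(price // step) + 1) * step - 10
--         else:
--             return int(round(price / step) * step - 10)
--     if direction == "down":
--         valid = [a for a in PRICE_ANCHORS if a <= price]
--         return valid[-1] if valid else PRICE_ANCHORS[0]
--     elif direction == "up":
--         valid = [a for a in PRICE_ANCHORS if a >= price]
--         return valid[0] if valid else PRICE_ANCHORS[-1]
--     else:
--         return min(PRICE_ANCHORS, key=lambda a: abs(a - price))
-- ===== SOURCE B (Python) =====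
-- PRICE_ANCHORS = [
--     990, 1990, 2990, 3990, 4990, 5990, 6990, 7990, 8990, 9990,
--     12990, 14990, 16990, 19990,
--     24990, 29990, 34990, 39990, 44990, 49990,
--     54990, 59990, 69990, 79990, 89990, 99990,
--     109990, 119990, 129990, 139990, 149990, 169990, 199990,
--     249990, 299990, 399990, 499990, 599990, 799990, 999990,
-- ]
--
--
-- def _scan(price):
--     """Single early-exit pass: (last anchor < price, first anchor >= price)."""
--     lo = None
--     for a in PRICE_ANCHORS:
--         if a >= price:
--             return lo, a
--         lo = a
--     return lo, None
--
--
-- def snap_to_price_anchor(price, direction="down"):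
--     """Snap price to the nearest cognitive price anchor."""
--     if price <= 0:
--         return 0
--     if price > PRICE_ANCHORS[-1]:
--         q, r = divmod(price, 10000)
--         if direction == "down":
--             return q * 10000 - 10
--         if direction == "up":
--             return (q + 1) * 10000 - 10
--         # round-half-even of price/10000, in exact integer arithmetic
--         if r != 5000:
--             q += r > 5000
--         elif q % 2:
--             q += 1
--         return q * 10000 - 10
--     lo, hi = _scan(price)  # hi is never None here: price <= PRICE_ANCHORS[-1]
--     if direction == "down":
--         return hi if hi == price else (lo if lo is not None else PRICE_ANCHORS[0])
--     if direction == "up":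
--         return hi
--     if lo is None or hi - price < price - lo:
--         return hi
--     return lo
-- ===== Notes on version B (the rewrite author's own statement) =====
-- stated objective: alternative
-- what changed: A's three separate full scans of PRICE_ANCHORS (a <=-filter taking the last element, a >=-filter taking the first, and min over the whole list by abs-distance) are replaced by one early-exit scan that finds the two neighbouring anchors (last below, first at-or-above) shared by all three directions, and the float round(price/step) in the overflow branch is replaced by exact integer half-even rounding via divmod.
import Mathlib
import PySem

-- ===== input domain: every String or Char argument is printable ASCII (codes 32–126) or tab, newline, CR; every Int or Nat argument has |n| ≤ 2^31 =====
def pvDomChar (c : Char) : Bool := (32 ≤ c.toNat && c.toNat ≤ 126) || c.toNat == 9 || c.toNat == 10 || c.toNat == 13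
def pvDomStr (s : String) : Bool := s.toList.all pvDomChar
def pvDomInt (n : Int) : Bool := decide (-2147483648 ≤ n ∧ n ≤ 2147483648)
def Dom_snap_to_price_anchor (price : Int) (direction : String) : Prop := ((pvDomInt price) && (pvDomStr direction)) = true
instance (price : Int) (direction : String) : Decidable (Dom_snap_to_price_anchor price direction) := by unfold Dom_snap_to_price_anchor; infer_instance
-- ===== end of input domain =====

-- B replaces A's three full scans of PRICE_ANCHORS (two list filters and a key-min) by one
-- early-exit neighbour scan shared by all directions, and the float round() by exact integer
-- half-even rounding; objective: simpler/alternative.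

-- ===== PORT A =====
def pyAnchors : List Int := [990, 1990, 2990, 3990, 4990, 5990, 6990, 7990, 8990, 9990,
  12990, 14990, 16990, 19990, 24990, 29990, 34990, 39990, 44990, 49990,
  54990, 59990, 69990, 79990, 89990, 99990, 109990, 119990, 129990, 139990,
  149990, 169990, 199990, 249990, 299990, 399990, 499990, 599990, 799990, 999990]

-- Port of Python's `round(price / step)` (step = 10000 > 0). Exact on the admitted domain:
-- for |price| ≤ 2^31 the quotient price/10000 is below 2^18, so the double division is the
-- correctly rounded rational and is exactly a half-integer iff the rational is; hence Python's
-- round() computes the half-even rounding of the exact rational price/10000, done here in integers.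
def pvRoundDiv (a b : Int) : Int :=
  if 2 * PySem.Int.mod a b < b then PySem.Int.floordiv a b
  else if b < 2 * PySem.Int.mod a b then PySem.Int.floordiv a b + 1
  else if PySem.Int.mod (PySem.Int.floordiv a b) 2 = 0 then PySem.Int.floordiv a b
  else PySem.Int.floordiv a b + 1

def snap_to_price_anchor (price : Int) (direction : String) : Int :=
  if price ≤ 0 then 0
  else if price > (PySem.List.pyGet? pyAnchors (-1)).getD 0 then  -- PRICE_ANCHORS[-1], list nonempty
    let step : Int := 10000
    if direction == "down" then (PySem.Int.floordiv price step) * step - 10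
    else if direction == "up" then (PySem.Int.floordiv price step + 1) * step - 10
    else pvRoundDiv price step * step - 10
  else if direction == "down" then
    let valid := pyAnchors.filter (fun a => decide (a ≤ price))
    if valid ≠ [] then (PySem.List.pyGet? valid (-1)).getD 0
    else (PySem.List.pyGet? pyAnchors 0).getD 0
  else if direction == "up" then
    let valid := pyAnchors.filter (fun a => decide (a ≥ price))
    if valid ≠ [] then (PySem.List.pyGet? valid 0).getD 0
    else (PySem.List.pyGet? pyAnchors (-1)).getD 0
  else (PySem.List.min? pyAnchors (fun a => |a - price|)).getD 0  -- min(..., key=abs(a-price)), nonempty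

-- ===== PORT B =====
-- Source B's `_scan`: single early-exit pass, returns (last anchor < price, first anchor ≥ price)
def altScan (price : Int) : List Int → Option Int → Option Int × Option Int
  | [], lo => (lo, none)
  | a :: rest, lo => if a ≥ price then (lo, some a) else altScan price rest (some a)

def snap_to_price_anchor_alt (price : Int) (direction : String) : Int :=
  if price ≤ 0 then 0
  else if price > 999990 then  -- PRICE_ANCHORS[-1]
    match (PySem.Int.divmod? price 10000).getD (0, 0) with  -- divisor ≠ 0, getD unreachable
    | (q, r) =>
      if direction == "down" then q * 10000 - 10
      else if direction == "up" then (q + 1) * 10000 - 10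
      else
        -- round-half-even of price/10000 in exact integer arithmetic
        let q' := if r ≠ 5000 then (if r > 5000 then q + 1 else q)
                  else if PySem.Int.mod q 2 ≠ 0 then q + 1 else q
        q' * 10000 - 10
  else
    match altScan price pyAnchors none with
    | (lo, hi) =>
      if direction == "down" then
        if hi == some price then price else lo.getD 990  -- PRICE_ANCHORS[0]
      else if direction == "up" then hi.getD 0  -- hi is never none here
      else
        match lo, hi with
        | none, hi => hi.getD 0
        | some l, some h => if h - price < price - l then h else l
        | some l, none => l  -- unreachable: price ≤ PRICE_ANCHORS[-1]

-- ===== PRECONDITION & SPEC =====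
def Spec_snap_to_price_anchor (price : Int) (direction : String) (out : Int) : Prop := out = snap_to_price_anchor_alt price direction
instance (price : Int) (direction : String) (out : Int) : Decidable (Spec_snap_to_price_anchor price direction out) := by unfold Spec_snap_to_price_anchor; infer_instance

-- ===== CLAIM (what is proved, stated in full; the proofs are below) =====
def Claim_equal_snap_to_price_anchor : Prop := ∀ (price : Int) (direction : String), Dom_snap_to_price_anchor price direction → Spec_snap_to_price_anchor price direction (snap_to_price_anchor price direction)

-- ===== LEMMAS AND PROOFS =====

theorem pvGet_neg_one (l : List Int) : PySem.List.pyGet? l (-1) = l.getLast? := by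
  unfold PySem.List.pyGet? PySem.List.pyIdx?
  rcases l with _ | ⟨a, t⟩
  · rfl
  · simp [List.getLast?_eq_getElem?]

-- the step function of PySem.List.min?
def minStep (key : Int → Int) : Option Int → Int → Option Int
  | none, x => some x
  | some m, x => if key x < key m then some x else some m

theorem min?_as_foldl (xs : List Int) (key : Int → Int) :
    PySem.List.min? xs key = xs.foldl (minStep key) none := by
  unfold PySem.List.min?
  congr 1
  funext acc x
  cases acc <;> rfl

theorem foldl_minStep_keep (key : Int → Int) (xs : List Int) (b : Int)
    (h : ∀ y ∈ xs, key b ≤ key y) : xs.foldl (minStep key) (some b) = some b := by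
  induction xs with
  | nil => rfl
  | cons a t ih =>
      have hba : ¬ key a < key b := not_lt.mpr (h a (by simp))
      simp only [List.foldl, minStep, if_neg hba]
      exact ih (fun y hy => h y (by simp [hy]))

theorem min?_mem' (xs : List Int) (key : Int → Int) (m : Int)
    (h : xs.foldl (minStep key) none = some m) : m ∈ xs := by
  have := PySem.List.min?_mem (xs := xs) (key := key) (m := m)
  rw [min?_as_foldl] at this
  exact this h

theorem min?_eq_of_split (key : Int → Int) (pre suf : List Int) (m : Int)
    (hpre : ∀ y ∈ pre, key m < key y) (hsuf : ∀ y ∈ suf, key m ≤ key y) :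
    PySem.List.min? (pre ++ m :: suf) key = some m := by
  rw [min?_as_foldl, List.foldl_append]
  rcases hb : pre.foldl (minStep key) none with _ | b
  · simp only [List.foldl]
    rw [show minStep key none m = some m from rfl]
    exact foldl_minStep_keep key suf m hsuf
  · have hbmem : b ∈ pre := min?_mem' pre key b hb
    simp only [List.foldl]
    rw [show minStep key (some b) m = some m by
      simp [minStep, if_pos (hpre b hbmem)]]
    exact foldl_minStep_keep key suf m hsuf

-- characterization of the early-exit scan
theorem altScan_none (p : Int) (L : List Int) (lo lo' : Option Int)
    (h : altScan p L lo = (lo', none)) : ∀ y ∈ L, y < p := by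
  induction L generalizing lo with
  | nil => simp
  | cons a t ih =>
      intro y hy
      by_cases hap : a ≥ p
      · simp [altScan, if_pos hap] at h
      · simp only [altScan, if_neg hap] at h
        rcases List.mem_cons.mp hy with rfl | hy
        · omega
        · exact ih (some a) h y hy

theorem altScan_some (p : Int) (L : List Int) (lo lo' : Option Int) (h : Int)
    (heq : altScan p L lo = (lo', some h)) :
    ∃ tw suf, L = tw ++ h :: suf ∧ (∀ y ∈ tw, y < p) ∧ p ≤ h ∧ lo' = tw.getLast?.or lo := by
  induction L generalizing lo with
  | nil => simp [altScan] at heq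
  | cons a t ih =>
      by_cases hap : a ≥ p
      · simp only [altScan, if_pos hap, Prod.mk.injEq, Option.some.injEq] at heq
        obtain ⟨rfl, rfl⟩ := heq
        exact ⟨[], t, by simp, by simp, by omega, by simp⟩
      · simp only [altScan, if_neg hap] at heq
        obtain ⟨tw, suf, hL, htw, hph, hlo⟩ := ih (some a) heq
        refine ⟨a :: tw, suf, by simp [hL], ?_, hph, ?_⟩
        · intro y hy
          rcases List.mem_cons.mp hy with rfl | hy
          · omega
          · exact htw y hy
        · rw [hlo]
          cases tw <;> simp [List.getLast?]

theorem pairwise_facts (h : Int) (tw suf : List Int)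
    (hL : pyAnchors = tw ++ h :: suf) :
    (∀ y ∈ tw, ∀ z, z = h ∨ z ∈ suf → y < z) ∧ (∀ z ∈ suf, h < z) := by
  have hP : pyAnchors.Pairwise (· < ·) := by decide
  rw [hL, List.pairwise_append] at hP
  obtain ⟨_, hc, hcross⟩ := hP
  rw [List.pairwise_cons] at hc
  constructor
  · intro y hy z hz
    rcases hz with rfl | hz
    · exact hcross y hy z (by simp)
    · exact hcross y hy z (by simp [hz])
  · exact hc.1

-- the three in-range branch equalities, from the scan decomposition
theorem down_branch (p h : Int) (tw suf : List Int) (hL : pyAnchors = tw ++ h :: suf)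
    (htw : ∀ y ∈ tw, y < p) (hph : p ≤ h) :
    (if (pyAnchors.filter (fun a => decide (a ≤ p))) ≠ [] then
        (PySem.List.pyGet? (pyAnchors.filter (fun a => decide (a ≤ p))) (-1)).getD 0
      else (PySem.List.pyGet? pyAnchors 0).getD 0)
    = (if (some h == some p) then p else (tw.getLast?.or none).getD 990) := by
  obtain ⟨hcross, hsuf⟩ := pairwise_facts h tw suf hL
  have hftw : tw.filter (fun a => decide (a ≤ p)) = tw :=
    List.filter_eq_self.mpr (fun y hy => by simpa using le_of_lt (htw y hy))
  have hfsuf : suf.filter (fun a => decide (a ≤ p)) = [] :=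
    List.filter_eq_nil_iff.mpr (fun z hz => by
      have := hsuf z hz; simp only [decide_eq_true_eq]; omega)
  by_cases hhp : h = p
  · subst hhp
    have : pyAnchors.filter (fun a => decide (a ≤ h)) = tw ++ [h] := by
      rw [hL, List.filter_append, hftw, List.filter_cons, hfsuf]
      simp
    rw [this]
    simp
  · have hlt : p < h := lt_of_le_of_ne hph (fun e => hhp e.symm)
    have : pyAnchors.filter (fun a => decide (a ≤ p)) = tw := by
      rw [hL, List.filter_append, hftw, List.filter_cons, hfsuf]
      simp [not_le.mpr hlt]
    rw [this]
    have hbeq : (some h == some p) = false := by simp [hhp]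
    rw [hbeq]
    simp only [Bool.false_eq_true, if_false]
    rcases htwc : tw with _ | ⟨a, t⟩
    · simp [pyAnchors]
    · have hne : (a :: t) ≠ ([] : List Int) := by simp
      rw [if_pos hne, pvGet_neg_one]
      rcases hlast : (a :: t).getLast? with _ | x
      · simp at hlast
      · simp

theorem up_branch (p h : Int) (tw suf : List Int) (hL : pyAnchors = tw ++ h :: suf)
    (htw : ∀ y ∈ tw, y < p) (hph : p ≤ h) :
    (if (pyAnchors.filter (fun a => decide (a ≥ p))) ≠ [] then
        (PySem.List.pyGet? (pyAnchors.filter (fun a => decide (a ≥ p))) 0).getD 0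
      else (PySem.List.pyGet? pyAnchors (-1)).getD 0)
    = ((some h : Option Int).getD 0) := by
  obtain ⟨hcross, hsuf⟩ := pairwise_facts h tw suf hL
  have hftw : tw.filter (fun a => decide (a ≥ p)) = [] :=
    List.filter_eq_nil_iff.mpr (fun z hz => by
      have := htw z hz; simp only [decide_eq_true_eq]; omega)
  have hfsuf : suf.filter (fun a => decide (a ≥ p)) = suf :=
    List.filter_eq_self.mpr (fun y hy => by
      have := hsuf y hy; simp only [decide_eq_true_eq]; omega)
  have : pyAnchors.filter (fun a => decide (a ≥ p)) = h :: suf := by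
    rw [hL, List.filter_append, hftw, List.filter_cons, hfsuf]
    simp [hph]
  rw [this]
  simp

theorem near_branch (p h : Int) (tw suf : List Int) (hL : pyAnchors = tw ++ h :: suf)
    (htw : ∀ y ∈ tw, y < p) (hph : p ≤ h) :
    ((PySem.List.min? pyAnchors (fun a => |a - p|)).getD 0)
    = (match tw.getLast?.or none, (some h : Option Int) with
       | none, hi => hi.getD 0
       | some l, some h => if h - p < p - l then h else l
       | some l, none => l) := by
  obtain ⟨hcross, hsuf⟩ := pairwise_facts h tw suf hL
  have keyh : |h - p| = h - p := abs_of_nonneg (by omega)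
  rcases hlast : tw.getLast? with _ | l
  · -- tw = []
    have htwnil : tw = [] := by
      rcases tw with _ | ⟨a, t⟩
      · rfl
      · simp at hlast
    subst htwnil
    simp only [List.nil_append] at hL
    have hmin : PySem.List.min? pyAnchors (fun a => |a - p|) = some h := by
      rw [hL]
      exact min?_eq_of_split _ [] suf h (by simp) (fun z hz => by
        have hz' := hsuf z hz
        have : |z - p| = z - p := abs_of_nonneg (by omega)
        omega)
    rw [hmin]
    rfl
  · obtain ⟨pre, hpre⟩ := List.getLast?_eq_some_iff.mp hlast
    have hlp : l < p := htw l (by simp [hpre])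
    have keyl : |l - p| = p - l := by
      rw [abs_sub_comm]; exact abs_of_nonneg (by omega)
    have hLL : pyAnchors = pre ++ l :: h :: suf := by
      rw [hL, hpre]; simp
    have hprekey : ∀ y ∈ pre, y < l := by
      intro y hy
      have : List.Pairwise (· < ·) pyAnchors := by decide
      rw [hLL, List.pairwise_append] at this
      exact this.2.2 y hy l (by simp)
    simp only [Option.or]
    by_cases hcase : h - p < p - l
    · rw [if_pos hcase]
      have hsplit : pyAnchors = (pre ++ [l]) ++ h :: suf := by rw [hLL]; simp
      have hmin : PySem.List.min? pyAnchors (fun a => |a - p|) = some h := by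
        rw [hsplit]
        refine min?_eq_of_split _ (pre ++ [l]) suf h ?_ ?_
        · intro y hy
          rcases List.mem_append.mp hy with hy | hy
          · have h1 := hprekey y hy
            have h2 : y ∈ tw := by simp [hpre, hy]
            have h3 := htw y h2
            have : |y - p| = p - y := by rw [abs_sub_comm]; exact abs_of_nonneg (by omega)
            omega
          · simp only [List.mem_singleton] at hy
            subst hy
            omega
        · intro z hz
          have hz' := hsuf z hz
          have : |z - p| = z - p := abs_of_nonneg (by omega)
          omega
      rw [hmin]
      rfl
    · rw [if_neg hcase]
      have hmin : PySem.List.min? pyAnchors (fun a => |a - p|) = some l := by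
        rw [hLL]
        refine min?_eq_of_split _ pre (h :: suf) l ?_ ?_
        · intro y hy
          have h1 := hprekey y hy
          have h2 : y ∈ tw := by simp [hpre, hy]
          have h3 := htw y h2
          have : |y - p| = p - y := by rw [abs_sub_comm]; exact abs_of_nonneg (by omega)
          omega
        · intro z hz
          rcases List.mem_cons.mp hz with rfl | hz
          · omega
          · have hz' := hsuf z hz
            have : |z - p| = z - p := abs_of_nonneg (by omega)
            omega
      rw [hmin]
      rfl

theorem big_branch (p : Int) (d : String) :
    (let step : Int := 10000
     if d == "down" then (PySem.Int.floordiv p step) * step - 10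
     else if d == "up" then (PySem.Int.floordiv p step + 1) * step - 10
     else pvRoundDiv p step * step - 10)
    = (match (PySem.Int.divmod? p 10000).getD (0, 0) with
       | (q, r) =>
         if d == "down" then q * 10000 - 10
         else if d == "up" then (q + 1) * 10000 - 10
         else
           let q' := if r ≠ 5000 then (if r > 5000 then q + 1 else q)
                     else if PySem.Int.mod q 2 ≠ 0 then q + 1 else q
           q' * 10000 - 10) := by
  have hdm : (PySem.Int.divmod? p 10000).getD (0, 0)
      = (PySem.Int.floordiv p 10000, PySem.Int.mod p 10000) := by
    unfold PySem.Int.divmod? PySem.Int.floordiv PySem.Int.mod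
    simp
  rw [hdm]
  by_cases h1 : d == "down"
  · simp [h1]
  · by_cases h2 : d == "up"
    · simp [h1, h2]
    · simp only [h1, h2, Bool.false_eq_true, if_false]
      unfold pvRoundDiv
      rw [PySem.Int.floordiv_eq_ediv_of_pos (by omega : (0:Int) < 10000),
          PySem.Int.mod_eq_emod_of_pos (by omega : (0:Int) < 10000),
          PySem.Int.mod_eq_emod_of_pos (by omega : (0:Int) < 2)]
      split_ifs <;> first | rfl | omega

-- ===== VERDICT (by name: the statement is the Claim_ definition above) =====
theorem snap_to_price_anchor_spec : Claim_equal_snap_to_price_anchor := by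
  intro price direction _
  unfold Spec_snap_to_price_anchor snap_to_price_anchor snap_to_price_anchor_alt
  by_cases hp0 : price ≤ 0
  · simp [hp0]
  · rw [if_neg hp0, if_neg hp0]
    rw [show (PySem.List.pyGet? pyAnchors (-1)).getD 0 = 999990 from by decide]
    by_cases hbig : price > 999990
    · rw [if_pos hbig, if_pos hbig]
      exact big_branch price direction
    · rw [if_neg hbig, if_neg hbig]
      rcases heq : altScan price pyAnchors none with ⟨lo', hi⟩
      rcases hi with _ | h
      · exfalso
        have := altScan_none price pyAnchors none lo' heq 999990 (by decide)
        omega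
      · obtain ⟨tw, suf, hL, htw, hph, hlo⟩ := altScan_some price pyAnchors none lo' h heq
        subst hlo
        by_cases h1 : (direction == "down") = true
        · simp only [h1, reduceIte]
          exact down_branch price h tw suf hL htw hph
        · rw [Bool.not_eq_true] at h1
          by_cases h2 : (direction == "up") = true
          · simp only [h1, h2]
            exact up_branch price h tw suf hL htw hph
          · rw [Bool.not_eq_true] at h2
            simp only [h1, h2]
            exact near_branch price h tw suf hL htw hph
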